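-- pv_equiv track=rewrite | github.com/Difio3333/Python-DAU | main.py | create_persian_scale
-- ===== SOURCE A (Python) =====
-- def create_persian_scale(note):
-- 	note -= 24
-- 	scale = []
-- 	persianscale = [1,3,1,1,2,3,1]
-- 	persianscale = [1,3,1,2,2,1,3]
-- 	#persianscale = [1,3,1,2,2,1,2]
--
-- 	i = 0
-- 	while i < 5:
-- 		z = 0
-- 		while z < len(persianscale):
-- 			note += persianscale[z]
-- 			scale.append(note)
-- 			z+=1
-- 		i+=1
--
-- 	return scale
-- ===== SOURCE B (Python) =====
-- def create_persian_scale(note):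
--     # Closed form: prefix sums of the 7-step pattern, tiled 5 cycles of total 13.
--     prefix = [1, 4, 5, 7, 9, 10, 13]
--     base = note - 24
--     return [base + 13 * q + p for q in range(5) for p in prefix]
-- ===== Notes on version B (the rewrite author's own statement) =====
-- stated objective: simpler
-- what changed: Replaced the nested while-loops with running mutable state by a closed-form comprehension: each entry is (note-24) + 13*cycle + prefix-sum of the 7-step pattern.
import Mathlib
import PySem

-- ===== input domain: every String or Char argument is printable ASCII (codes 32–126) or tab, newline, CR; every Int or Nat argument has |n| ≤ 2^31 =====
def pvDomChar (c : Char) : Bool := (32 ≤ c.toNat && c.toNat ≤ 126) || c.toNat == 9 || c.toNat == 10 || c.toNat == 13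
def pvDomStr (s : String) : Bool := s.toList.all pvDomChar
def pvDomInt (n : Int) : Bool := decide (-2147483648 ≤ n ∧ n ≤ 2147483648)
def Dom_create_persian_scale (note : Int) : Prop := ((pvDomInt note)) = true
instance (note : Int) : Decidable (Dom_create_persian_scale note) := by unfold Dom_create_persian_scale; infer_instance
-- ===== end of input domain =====

-- B replaces A's nested accumulating loops by a closed-form comprehension from the
-- pattern's prefix sums (objective: simpler).

-- ===== PORT A =====
-- inner while loop: fold over the pattern list, threading (note, scale)
def persianInner (st : Int × List Int) (step : Int) : Int × List Int :=
  (st.1 + step, st.2 ++ [st.1 + step])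

def create_persian_scale (note : Int) : List Int :=
  let note := note - 24
  let persianscale : List Int := [1,3,1,2,2,1,3]
  -- outer while loop i < 5: fold over range 5
  ((List.range 5).foldl (fun st _ => persianscale.foldl persianInner st) (note, [])).2

-- ===== PORT B =====
def create_persian_scale_alt (note : Int) : List Int :=
  let pref : List Int := [1, 4, 5, 7, 9, 10, 13]
  let base := note - 24
  (List.range 5).flatMap (fun q => pref.map (fun p => base + 13 * (q : Int) + p))

-- ===== PRECONDITION & SPEC =====
def Spec_create_persian_scale (note : Int) (out : List Int) : Prop := out = create_persian_scale_alt note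
instance (note : Int) (out : List Int) : Decidable (Spec_create_persian_scale note out) := by unfold Spec_create_persian_scale; infer_instance

-- ===== CLAIM (what is proved, stated in full; the proofs are below) =====
def Claim_equal_create_persian_scale : Prop := ∀ (note : Int), Dom_create_persian_scale note → Spec_create_persian_scale note (create_persian_scale note)

-- ===== LEMMAS AND PROOFS =====

-- ===== VERDICT (by name: the statement is the Claim_ definition above) =====
theorem create_persian_scale_spec : Claim_equal_create_persian_scale := by
  intro note _
  show create_persian_scale note = create_persian_scale_alt note
  simp [create_persian_scale, create_persian_scale_alt, persianInner,
        List.range_succ, List.foldl]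
  ring_nf
  norm_num
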